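-- pv_equiv track=rewrite | github.com/yenru0/CodeObjecct | zeta_python/completed/13305.py | solve
-- ===== SOURCE A (Python) =====
-- def solve(N, E, C):
--     S = 0
--
--     m = C[0]
--     for i in range(0, len(E)):
--         if C[i] <= m:
--             m = C[i]
--         S += m * E[i]
--
--     return S
-- ===== SOURCE B (Python) =====
-- def solve(N, E, C):
--     n = len(E)
--     # prefix sums of E: P[i] = E[0] + ... + E[i-1]
--     P = [0]
--     for x in E:
--         P.append(P[-1] + x)
--     # contribution / segment decomposition: each time a new running minimum C[j]
--     # appears it governs the whole segment [j, k), where k is the next index with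
--     # C[k] <= C[j]; add its contribution C[j] * (P[k] - P[j]) and jump to k.
--     S = 0
--     j = 0
--     while j < n:
--         k = j + 1
--         while k < n and C[k] > C[j]:
--             k += 1
--         S += C[j] * (P[k] - P[j])
--         j = k
--     return S
-- ===== Notes on version B (the rewrite author's own statement) =====
-- stated objective: alternative
-- what changed: B replaces A's fused running-minimum accumulation with a contribution/segment decomposition: it builds prefix sums P of E, then a two-pointer jump loop finds for each new running minimum C[j] the segment [j,k) it governs (k = next index with C[k] <= C[j]) and adds C[j]*(P[k]-P[j]) per segment instead of per element.
import Mathlib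
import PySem

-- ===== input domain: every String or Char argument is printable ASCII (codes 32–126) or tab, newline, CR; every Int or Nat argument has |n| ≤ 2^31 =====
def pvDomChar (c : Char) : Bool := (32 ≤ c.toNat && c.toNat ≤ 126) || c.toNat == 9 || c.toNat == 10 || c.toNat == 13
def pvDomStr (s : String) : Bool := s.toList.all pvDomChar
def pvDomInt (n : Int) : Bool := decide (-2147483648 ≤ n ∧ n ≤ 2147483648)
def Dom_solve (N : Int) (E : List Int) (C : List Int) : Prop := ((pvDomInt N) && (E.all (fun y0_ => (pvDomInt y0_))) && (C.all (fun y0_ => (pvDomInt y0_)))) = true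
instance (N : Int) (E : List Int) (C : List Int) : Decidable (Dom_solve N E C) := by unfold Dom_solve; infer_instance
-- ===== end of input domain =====

-- B is a different algorithm for the same value: instead of A's per-element running-minimum
-- accumulation, B builds prefix sums of E and adds one contribution C[j]*(P[k]-P[j]) per
-- segment [j,k) governed by each successive running minimum C[j]; same O(n) cost.

-- ===== PORT A =====
-- loop body of A: update running minimum m, add m * E[i] to S (state = (S, m))
def stepA (C E : List Int) (p : Int × Int) (i : Nat) : Int × Int :=
  let m := if C.getD i 0 ≤ p.2 then C.getD i 0 else p.2
  (p.1 + m * E.getD i 0, m)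

def solve (N : Int) (E : List Int) (C : List Int) : Int :=
  ((List.range E.length).foldl (stepA C E) (0, C.getD 0 0)).1

-- ===== PORT B =====
-- B's prefix-sum pass: P.append(P[-1] + x)  (P is never empty, so P[-1] = getLastD)
def prefStep (P : List Int) (x : Int) : List Int := P ++ [P.getLastD 0 + x]

def prefB (E : List Int) : List Int := E.foldl prefStep [0]

-- B's inner while loop (advance k while k < n and C[k] > C[j]); the fuel argument is a
-- totality guard only: k gains 1 per step and stops at n, so fuel n at the call suffices
def innerB (C : List Int) (cj : Int) (n : Nat) : Nat → Nat → Nat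
  | 0, k => k
  | f + 1, k => if k < n then (if cj < C.getD k 0 then innerB C cj n f (k + 1) else k) else k

-- B's outer while loop: one segment [j, k) per iteration, then jump to k; the fuel
-- argument is a totality guard only: j strictly increases each iteration, fuel n suffices
def outerB (C P : List Int) (n : Nat) : Nat → Nat → Int → Int
  | 0, _, S => S
  | f + 1, j, S =>
      if j < n then
        outerB C P n f (innerB C (C.getD j 0) n n (j + 1))
          (S + C.getD j 0 * (P.getD (innerB C (C.getD j 0) n n (j + 1)) 0 - P.getD j 0))
      else S

def solve_alt (N : Int) (E : List Int) (C : List Int) : Int :=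
  outerB C (prefB E) E.length E.length 0 0

-- ===== PRECONDITION & SPEC =====
-- Pre_solve = exactly the inputs where the Python A returns: C[0] must exist and every
-- index i < len(E) must be valid in C (otherwise A raises IndexError).
def Pre_solve (N : Int) (E : List Int) (C : List Int) : Prop :=
  C ≠ [] ∧ E.length ≤ C.length
instance (N : Int) (E : List Int) (C : List Int) : Decidable (Pre_solve N E C) := by
  unfold Pre_solve; infer_instance

def pvWitness_solve : Int × List Int × List Int := (0, [2, -3, 4], [5, 1, 7])

def Spec_solve (N : Int) (E : List Int) (C : List Int) (out : Int) : Prop := out = solve_alt N E C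
instance (N : Int) (E : List Int) (C : List Int) (out : Int) : Decidable (Spec_solve N E C out) := by unfold Spec_solve; infer_instance

-- ===== CLAIM (what is proved, stated in full; the proofs are below) =====
def Claim_equal_solve : Prop := ∀ (N : Int) (E : List Int) (C : List Int), Dom_solve N E C → Pre_solve N E C → Spec_solve N E C (solve N E C)

-- ===== LEMMAS AND PROOFS =====

theorem innerB_ge (C : List Int) (cj : Int) (n : Nat) :
    ∀ f k, k ≤ innerB C cj n f k := by
  intro f
  induction f with
  | zero => intro k; simp [innerB]
  | succ f ih =>
      intro k
      simp only [innerB]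
      split_ifs with h1 h2
      · exact Nat.le_trans (by omega) (ih (k + 1))
      · omega
      · omega

theorem innerB_le (C : List Int) (cj : Int) (n : Nat) :
    ∀ f k, k ≤ n → innerB C cj n f k ≤ n := by
  intro f
  induction f with
  | zero => intro k h; simpa [innerB] using h
  | succ f ih =>
      intro k h
      simp only [innerB]
      split_ifs with h1 h2
      · exact ih (k + 1) (by omega)
      · omega
      · omega

theorem innerB_mid (C : List Int) (cj : Int) (n : Nat) :
    ∀ f k i, k ≤ i → i < innerB C cj n f k → cj < C.getD i 0 := by
  intro f
  induction f with
  | zero => intro k i h1 h2; simp [innerB] at h2; omega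
  | succ f ih =>
      intro k i h1 h2
      simp only [innerB] at h2
      split_ifs at h2 with hk hc
      · rcases Nat.eq_or_lt_of_le h1 with rfl | hlt
        · exact hc
        · exact ih (k + 1) i hlt h2
      · omega
      · omega

theorem innerB_stop (C : List Int) (cj : Int) (n : Nat) :
    ∀ f k, n - k ≤ f → innerB C cj n f k < n → ¬ cj < C.getD (innerB C cj n f k) 0 := by
  intro f
  induction f with
  | zero => intro k hf h; simp only [innerB] at h; omega
  | succ f ih =>
      intro k hf h
      simp only [innerB] at h ⊢
      split_ifs at h ⊢ with hk hc
      · exact ih (k + 1) (by omega) h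
      · exact hc
      · omega

-- prefB builds exactly the prefix sums of E
theorem prefB_eq (E : List Int) :
    prefB E = (List.range (E.length + 1)).map (fun i => (E.take i).sum) := by
  induction E using List.reverseRecOn with
  | nil => simp [prefB]
  | append_singleton E x ih =>
      unfold prefB at *
      rw [List.foldl_append, ih]
      have hlast : ((List.range (E.length + 1)).map (fun i => (E.take i).sum)).getLastD 0
          = E.sum := by
        rw [List.range_succ, List.map_append]
        simp
      simp only [List.foldl, prefStep, hlast]
      rw [List.length_append, List.length_singleton,
        List.range_succ (n := E.length + 1), List.map_append]
      congr 1
      · apply List.map_congr_left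
        intro i hi
        have hle : i ≤ E.length := by
          have := List.mem_range.mp hi; omega
        simp [List.take_append_of_le_length hle]
      · have h1 : (E ++ [x]).take (E.length + 1) = E ++ [x] := by
          apply List.take_of_length_le; simp
        simp [h1]

theorem prefB_getD (E : List Int) (i : Nat) (h : i ≤ E.length) :
    (prefB E).getD i 0 = (E.take i).sum := by
  rw [prefB_eq, List.getD_eq_getElem?_getD, List.getElem?_map, List.getElem?_range (by omega)]
  simp

theorem prefB_succ (E : List Int) (k : Nat) (h : k < E.length) :
    (prefB E).getD (k + 1) 0 = (prefB E).getD k 0 + E.getD k 0 := by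
  rw [prefB_getD E (k + 1) (by omega), prefB_getD E k (by omega)]
  rw [List.take_add_one, List.sum_append]
  have hk : E[k]? = some (E.getD k 0) := by
    rw [List.getD_eq_getElem?_getD, List.getElem?_eq_getElem h]; rfl
  rw [hk]
  simp

-- segment lemma: while C[j] stays the running minimum (all of (j,k) is strictly above
-- C[j]), A's fold from j to k adds exactly C[j] * (P[k] - P[j]) and keeps m = C[j]
theorem segA (C E : List Int) (j : Nat) :
    ∀ k, j < k → k ≤ E.length →
    C.getD j 0 ≤ ((List.range j).foldl (stepA C E) (0, C.getD 0 0)).2 →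
    (∀ i, j < i → i < k → C.getD j 0 < C.getD i 0) →
    (List.range k).foldl (stepA C E) (0, C.getD 0 0)
      = (((List.range j).foldl (stepA C E) (0, C.getD 0 0)).1
          + C.getD j 0 * ((prefB E).getD k 0 - (prefB E).getD j 0), C.getD j 0) := by
  intro k
  induction k with
  | zero => intro h; omega
  | succ k' ih =>
      intro hjk hkn hm hmid
      rw [List.range_succ, List.foldl_append]
      rcases Nat.eq_or_lt_of_le (Nat.le_of_lt_succ hjk) with rfl | hjk'
      · -- k = j + 1: one step of A at index j, which updates m to C[j]
        simp only [List.foldl, stepA, if_pos hm]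
        rw [prefB_succ E j (by omega)]
        ring_nf
      · -- k = k' + 1 with j < k': extend the segment by index k'
        rw [ih hjk' (by omega) hm (fun i h1 h2 => hmid i h1 (by omega))]
        have hgt : C.getD j 0 < C.getD k' 0 := hmid k' hjk' (by omega)
        simp only [List.foldl, stepA, if_neg (by omega : ¬ C.getD k' 0 ≤ C.getD j 0)]
        rw [prefB_succ E k' (by omega)]
        ring_nf

-- main invariant: B's outer loop, started at a position j whose C[j] is at most the
-- current running minimum, with A's partial sum as accumulator, finishes A's fold
theorem mainB (C E : List Int) :
    ∀ f j, E.length - j ≤ f → j ≤ E.length →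
    (j < E.length → C.getD j 0 ≤ ((List.range j).foldl (stepA C E) (0, C.getD 0 0)).2) →
    outerB C (prefB E) E.length f j (((List.range j).foldl (stepA C E) (0, C.getD 0 0)).1)
      = ((List.range E.length).foldl (stepA C E) (0, C.getD 0 0)).1 := by
  intro f
  induction f with
  | zero =>
      intro j hf hj hm
      have : j = E.length := by omega
      subst this
      simp [outerB]
  | succ f ih =>
      intro j hf hj hm
      by_cases hjn : j < E.length
      · simp only [outerB, if_pos hjn]
        set k := innerB C (C.getD j 0) E.length E.length (j + 1) with hk
        have hk1 : j + 1 ≤ k := innerB_ge _ _ _ _ _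
        have hk2 : k ≤ E.length := innerB_le _ _ _ _ _ (by omega)
        have hseg := segA C E j k (by omega) hk2 (hm hjn)
          (fun i h1 h2 => innerB_mid C (C.getD j 0) E.length E.length (j + 1) i (by omega) h2)
        have hS : (((List.range j).foldl (stepA C E) (0, C.getD 0 0)).1
            + C.getD j 0 * ((prefB E).getD k 0 - (prefB E).getD j 0))
            = ((List.range k).foldl (stepA C E) (0, C.getD 0 0)).1 := by
          rw [hseg]
        rw [hS]
        exact ih k (by omega) hk2
          (fun hkn => by
            have := innerB_stop C (C.getD j 0) E.length E.length (j + 1) (by omega) (hk ▸ hkn)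
            rw [← hk] at this
            rw [hseg]; omega)
      · have : j = E.length := by omega
        subst this
        simp only [outerB, if_neg hjn]

-- ===== VERDICT (by name: the statement is the Claim_ definition above) =====
theorem solve_spec : Claim_equal_solve := by
  intro N E C _ _
  unfold Spec_solve solve solve_alt
  have h := mainB C E E.length 0 (by omega) (by omega) (fun _ => by simp)
  simpa using h.symm
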